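-- pv_equiv track=rewrite | github.com/AlexBrodbelt/AdventOfCode | 2022/day5_part1.py | get_crates
-- ===== SOURCE A (Python) =====
-- def get_crates(line):
--     crate = ""
--     crates = []
--     for i, char in enumerate(line):
--         if (i+1) % 4 == 0:
--             crates.append(crate)
--             crate = ""
--         else:
--             crate += char
--     crates.append(crate)
--     return crates
-- ===== SOURCE B (Python) =====
-- def get_crates(line):
--     q = len(line) // 4
--     return [line[4 * i:4 * i + 3] for i in range(q + 1)]
-- ===== Notes on version B (the rewrite author's own statement) =====
-- stated objective: simpler
-- what changed: Replaces the per-character loop with a modulo branch and a running accumulator by a comprehension over chunk indices that slices each 3-char crate field directly (len(line)//4 + 1 chunks, the last possibly shorter or empty); slicing avoids per-character string concatenation.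
import Mathlib
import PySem

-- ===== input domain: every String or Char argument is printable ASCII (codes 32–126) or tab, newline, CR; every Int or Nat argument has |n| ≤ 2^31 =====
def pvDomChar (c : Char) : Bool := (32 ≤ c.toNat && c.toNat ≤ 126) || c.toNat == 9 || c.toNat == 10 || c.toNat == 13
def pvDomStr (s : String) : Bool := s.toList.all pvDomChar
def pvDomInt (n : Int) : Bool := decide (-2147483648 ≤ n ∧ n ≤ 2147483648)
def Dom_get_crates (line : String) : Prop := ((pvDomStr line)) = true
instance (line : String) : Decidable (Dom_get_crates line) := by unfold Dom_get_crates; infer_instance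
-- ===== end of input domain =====

-- B replaces A's per-character loop/accumulator by a comprehension slicing each 3-char chunk; objective: simpler.

-- ===== PORT A =====
-- the for-loop over enumerate(line) as structural recursion over the same state (i, crate, crates)
def getCratesGo : Nat → List Char → List (List Char) → List Char → List (List Char)
  | _, crate, crates, [] => crates ++ [crate]
  | i, crate, crates, c :: rest =>
      if (i + 1) % 4 == 0 then getCratesGo (i + 1) [] (crates ++ [crate]) rest
      else getCratesGo (i + 1) (crate ++ [c]) crates rest

def get_crates (line : String) : List String :=
  (getCratesGo 0 [] [] line.toList).map String.ofList

-- ===== PORT B =====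
def get_crates_alt (line : String) : List String :=
  (PySem.List.pyRange 0 (PySem.Int.floordiv (PySem.Str.len line) 4 + 1) 1).map
    (fun i => String.ofList (PySem.List.slice line.toList (some (4 * i)) (some (4 * i + 3))))

-- ===== PRECONDITION & SPEC =====
def Spec_get_crates (line : String) (out : List String) : Prop := out = get_crates_alt line
instance (line : String) (out : List String) : Decidable (Spec_get_crates line out) := by unfold Spec_get_crates; infer_instance

-- ===== CLAIM (what is proved, stated in full; the proofs are below) =====
def Claim_equal_get_crates : Prop := ∀ (line : String), Dom_get_crates line → Spec_get_crates line (get_crates line)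

-- ===== LEMMAS AND PROOFS =====

-- chunksFrom crate l: what the loop produces from state (crate, crates=[]) at an index ≡ 0 (mod 4)
def chunksFrom : List Char → List Char → List (List Char)
  | crate, l =>
    if h : l.length < 4 then [crate ++ l]
    else (crate ++ l.take 3) :: chunksFrom [] (l.drop 4)
  termination_by _ l => l.length
  decreasing_by simp; omega

lemma chunksFrom_short (crate l) (h : l.length < 4) : chunksFrom crate l = [crate ++ l] := by
  rw [chunksFrom]; simp [h]

lemma chunksFrom_long (crate l) (h : ¬ l.length < 4) :
    chunksFrom crate l = (crate ++ l.take 3) :: chunksFrom [] (l.drop 4) := by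
  rw [chunksFrom]; simp [h]

lemma getCratesGo_spec : ∀ n (l : List Char), l.length ≤ n → ∀ i crate crates, i % 4 = 0 →
    getCratesGo i crate crates l = crates ++ chunksFrom crate l := by
  intro n
  induction n with
  | zero =>
    intro l hl i crate crates hi
    have : l = [] := List.eq_nil_of_length_eq_zero (by omega)
    subst this
    simp [getCratesGo, chunksFrom_short]
  | succ n ih =>
    intro l hl i crate crates hi
    match l with
    | [] => simp [getCratesGo, chunksFrom_short]
    | [c0] =>
      have h1 : (i + 1) % 4 ≠ 0 := by omega
      simp [getCratesGo, h1, chunksFrom_short]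
    | [c0, c1] =>
      have h1 : (i + 1) % 4 ≠ 0 := by omega
      have h2 : (i + 2) % 4 ≠ 0 := by omega
      simp [getCratesGo, h1, h2, chunksFrom_short]
    | [c0, c1, c2] =>
      have h1 : (i + 1) % 4 ≠ 0 := by omega
      have h2 : (i + 2) % 4 ≠ 0 := by omega
      have h3 : (i + 3) % 4 ≠ 0 := by omega
      simp [getCratesGo, h1, h2, h3, chunksFrom_short]
    | c0 :: c1 :: c2 :: c3 :: rest =>
      have h1 : (i + 1) % 4 ≠ 0 := by omega
      have h2 : (i + 1 + 1) % 4 ≠ 0 := by omega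
      have h3 : (i + 1 + 1 + 1) % 4 ≠ 0 := by omega
      have h4 : (i + 1 + 1 + 1 + 1) % 4 = 0 := by omega
      have hlen : rest.length ≤ n := by simp at hl; omega
      simp only [getCratesGo, h1, h2, h3, h4, beq_iff_eq, if_false]
      conv_rhs => rw [chunksFrom_long crate (c0 :: c1 :: c2 :: c3 :: rest)
        (by simp only [List.length_cons]; omega)]
      rw [ih rest hlen _ _ _ (by omega)]
      simp

-- the slice-comprehension, reduced to drop/take on the character list
lemma chunks_eq : ∀ n (l : List Char), l.length ≤ n →
    (List.range (l.length / 4 + 1)).map (fun k => (l.drop (4 * k)).take 3) = chunksFrom [] l := by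
  intro n
  induction n with
  | zero =>
    intro l hl
    have : l = [] := List.eq_nil_of_length_eq_zero (by omega)
    subst this
    simp [chunksFrom_short]
  | succ n ih =>
    intro l hl
    by_cases h : l.length < 4
    · have : l.length / 4 = 0 := by omega
      rw [this, chunksFrom_short _ _ h]
      simp [List.take_of_length_le (by omega : l.length ≤ 3)]
    · have hq : l.length / 4 = (l.drop 4).length / 4 + 1 := by
        simp; omega
      rw [chunksFrom_long _ _ h, hq]
      rw [List.range_succ_eq_map]
      simp only [List.map_cons, List.map_map]
      refine congrArg₂ List.cons (by simp) ?_
      rw [← ih (l.drop 4) (by simp; omega)]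
      simp only [List.length_drop]
      apply List.map_congr_left
      intro k _
      simp only [Function.comp, List.drop_drop]
      rw [show 4 * Nat.succ k = 4 + 4 * k by omega]

lemma floordiv_natCast (n : Nat) : PySem.Int.floordiv (n : Int) 4 = ((n / 4 : Nat) : Int) := by
  simp [PySem.Int.floordiv, Int.fdiv_eq_ediv]

-- ===== VERDICT (by name: the statement is the Claim_ definition above) =====
theorem get_crates_spec : Claim_equal_get_crates := by
  intro line _
  unfold Spec_get_crates get_crates get_crates_alt
  rw [getCratesGo_spec line.toList.length line.toList le_rfl 0 [] [] rfl]
  rw [PySem.Str.len_eq, floordiv_natCast, PySem.List.pyRange_one]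
  rw [← chunks_eq line.toList.length line.toList le_rfl]
  simp only [List.nil_append, List.map_map]
  apply List.map_congr_left
  intro k hk
  simp only [Function.comp]
  congr 1
  rw [show (4 * ((0 : Int) + (k : Int))) = ((4 * k : Nat) : Int) by push_cast; ring]
  rw [show ((4 * k : Nat) : Int) + 3 = ((4 * k : Nat) : Int) + ((3 : Nat) : Int) by norm_num]
  rw [PySem.List.slice_natCast_add]
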